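-- pv_equiv track=rewrite | github.com/WhiskeyMotel/python_prog | vigenere.py | find_number_letter
-- ===== SOURCE A (Python) =====
-- def find_number_letter(letter):
--     Alphabet_big = ['A', 'B', 'C', 'D', 'E', 'F', 'G', 'H', 'I', 'J', 'K', 'L', 'M', 'N', 'O', 'P', 'Q', 'R', 'S', 'T', 'U',
--                 'V', 'W', 'X', 'Y', 'Z']
--     Alphabet_small = ['a', 'b', 'c', 'd', 'e', 'f', 'g', 'h', 'i', 'j', 'k', 'l', 'm', 'n', 'o', 'p', 'q', 'r', 's', 't',
--                     'u',
--                     'v', 'w', 'x', 'y', 'z']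
--     for i in range (26):
--         if letter==Alphabet_big[i]:
--             return int(i)
--     for i in range (26):
--         if letter==Alphabet_small[i]:
--             return int(i)
-- ===== SOURCE B (Python) =====
-- def find_number_letter(letter):
--     if isinstance(letter, str) and len(letter) == 1:
--         if 'A' <= letter <= 'Z':
--             return ord(letter) - ord('A')
--         if 'a' <= letter <= 'z':
--             return ord(letter) - ord('a')
--     return None
-- ===== Notes on version B (the rewrite author's own statement) =====
-- stated objective: simpler
-- what changed: Replaces the two 26-element list scans with a closed-form computation on the character code (ord(letter) - ord('A'|'a')) guarded by a single-character range check.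
import Mathlib
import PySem

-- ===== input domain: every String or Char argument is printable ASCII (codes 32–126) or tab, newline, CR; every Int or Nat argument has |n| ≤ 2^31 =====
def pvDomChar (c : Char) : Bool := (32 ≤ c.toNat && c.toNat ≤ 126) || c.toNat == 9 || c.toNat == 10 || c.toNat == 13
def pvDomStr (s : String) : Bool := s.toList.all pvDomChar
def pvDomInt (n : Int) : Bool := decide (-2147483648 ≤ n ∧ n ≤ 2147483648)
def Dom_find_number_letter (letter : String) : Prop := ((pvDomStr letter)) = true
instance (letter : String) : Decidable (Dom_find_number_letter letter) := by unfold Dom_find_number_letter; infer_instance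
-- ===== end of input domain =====

-- B replaces A's two 26-element alphabet scans with closed-form arithmetic on the character code (simpler).

-- ===== PORT A =====
-- A's alphabet constants, as Python single-character strings
def pvAlphabetBig : List String :=
  ["A","B","C","D","E","F","G","H","I","J","K","L","M","N","O","P","Q","R","S","T","U","V","W","X","Y","Z"]
def pvAlphabetSmall : List String :=
  ["a","b","c","d","e","f","g","h","i","j","k","l","m","n","o","p","q","r","s","t","u","v","w","x","y","z"]

-- the 'for i in range(26): if letter == alphabet[i]: return int(i)' loop (early return = first match)
def pvScan (letter : String) : List String → Int → Option Int
  | [], _ => none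
  | a :: t, i => if letter = a then some i else pvScan letter t (i + 1)

def find_number_letter (letter : String) : Option Int :=
  match pvScan letter pvAlphabetBig 0 with
  | some i => some i
  | none => pvScan letter pvAlphabetSmall 0

-- ===== PORT B =====
def find_number_letter_alt (letter : String) : Option Int :=
  match letter.toList with
  | [c] =>
    if 'A' ≤ c ∧ c ≤ 'Z' then some ((c.toNat : Int) - 65)
    else if 'a' ≤ c ∧ c ≤ 'z' then some ((c.toNat : Int) - 97)
    else none
  | _ => none

-- ===== PRECONDITION & SPEC =====
def Spec_find_number_letter (letter : String) (out : Option Int) : Prop := out = find_number_letter_alt letter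
instance (letter : String) (out : Option Int) : Decidable (Spec_find_number_letter letter out) := by unfold Spec_find_number_letter; infer_instance

-- ===== CLAIM (what is proved, stated in full; the proofs are below) =====
def Claim_equal_find_number_letter : Prop := ∀ (letter : String), Dom_find_number_letter letter → Spec_find_number_letter letter (find_number_letter letter)

-- ===== LEMMAS AND PROOFS =====
-- If letter is not a single-character string, A's scans all fail and A returns none.
set_option maxHeartbeats 2000000 in
theorem pv_none_of_not_single (letter : String)
    (h : ∀ c : Char, letter.toList ≠ [c]) :
    find_number_letter letter = none := by
  have hne : ∀ s ∈ pvAlphabetBig ++ pvAlphabetSmall, letter ≠ s := by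
    intro s hs heq
    subst heq
    fin_cases hs <;> exact (h _) rfl
  have key : ∀ (l : List String) (i : Int),
      (∀ s ∈ l, letter ≠ s) → pvScan letter l i = none := by
    intro l
    induction l with
    | nil => intro i _; rfl
    | cons a t ih =>
      intro i hl
      simp only [pvScan]
      rw [if_neg (hl a (List.mem_cons_self ..))]
      exact ih _ (fun s hs => hl s (List.mem_cons_of_mem _ hs))
  simp only [find_number_letter]
  rw [key _ 0 (fun s hs => hne s (List.mem_append_left _ hs)),
      key _ 0 (fun s hs => hne s (List.mem_append_right _ hs))]

-- On a single printable-ASCII character the two ports agree (checked by enumeration).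
set_option maxHeartbeats 2000000 in
theorem pv_single (letter : String) (c : Char) (hl : letter.toList = [c])
    (hdom : pvDomChar c = true) :
    find_number_letter letter = find_number_letter_alt letter := by
  have hletter : letter = String.ofList [c] := by rw [← hl, String.ofList_toList]
  have hb : 9 ≤ c.toNat ∧ c.toNat ≤ 126 := by
    simp only [pvDomChar, Bool.or_eq_true, Bool.and_eq_true, decide_eq_true_eq, beq_iff_eq]
      at hdom
    omega
  obtain ⟨n, hn9, hn126, rfl⟩ :
      ∃ n : ℕ, 9 ≤ n ∧ n ≤ 126 ∧ c = Char.ofNat n :=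
    ⟨c.toNat, hb.1, hb.2, (Char.ofNat_toNat c).symm⟩
  subst hletter
  interval_cases n <;> decide

-- ===== VERDICT (by name: the statement is the Claim_ definition above) =====
set_option maxHeartbeats 2000000 in
theorem find_number_letter_spec : Claim_equal_find_number_letter := by
  intro letter hdom
  unfold Spec_find_number_letter
  rcases hl : letter.toList with _ | ⟨c, _ | ⟨c2, t⟩⟩
  · rw [pv_none_of_not_single letter (by simp [hl])]
    simp only [find_number_letter_alt, hl]
  · have hc : pvDomChar c = true := by
      have := hdom
      unfold Dom_find_number_letter pvDomStr at this
      rw [hl] at this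
      simpa using this
    exact pv_single letter c hl hc
  · rw [pv_none_of_not_single letter (by simp [hl])]
    simp only [find_number_letter_alt, hl]
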